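-- pv_equiv track=rewrite | github.com/lordicode/Networking_Calculator | main.py | is_valid_binary_ipv4
-- ===== SOURCE A (Python) =====
-- def is_valid_binary_ipv4(address):
--     """
--     Validates the IP address in binary notation as all other calculations do not matter if the value entered is not allowed.
--     An IPv4 address is valid in binary if:
--     1. It contains exactly 4 parts separated by dots
--     2. Each part is in a set of 01
--     3. No empty parts, no symbols outside 01,non-numeric values are allowed
--     """
--     try:
--         parts = address.split(".")
--         if len(parts) != 4:
--             return False
--         for part in parts:
--             binary_digit = str(part)
--             if not set(binary_digit).issubset({'0', '1'}) or len(part) != 8: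
--                 return False
--         return True
--     except:
--         return False
-- ===== SOURCE B (Python) =====
-- def is_valid_binary_ipv4(address):
--     # Positional scan: a valid binary IPv4 is exactly 35 characters long with
--     # '.' at positions 8, 17, 26 and '0'/'1' everywhere else.
--     try:
--         if len(address) != 35:
--             return False
--         for i, ch in enumerate(address):
--             if i in (8, 17, 26):
--                 if ch != '.':
--                     return False
--             elif ch not in '01':
--                 return False
--         return True
--     except:
--         return False
-- ===== Notes on version B (the rewrite author's own statement) =====
-- stated objective: alternative
-- what changed: Replaces split('.')+per-part set-subset checks with a single positional scan: length must be 35, dots exactly at indices 8/17/26, '0'/'1' everywhere else.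
import Mathlib
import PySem

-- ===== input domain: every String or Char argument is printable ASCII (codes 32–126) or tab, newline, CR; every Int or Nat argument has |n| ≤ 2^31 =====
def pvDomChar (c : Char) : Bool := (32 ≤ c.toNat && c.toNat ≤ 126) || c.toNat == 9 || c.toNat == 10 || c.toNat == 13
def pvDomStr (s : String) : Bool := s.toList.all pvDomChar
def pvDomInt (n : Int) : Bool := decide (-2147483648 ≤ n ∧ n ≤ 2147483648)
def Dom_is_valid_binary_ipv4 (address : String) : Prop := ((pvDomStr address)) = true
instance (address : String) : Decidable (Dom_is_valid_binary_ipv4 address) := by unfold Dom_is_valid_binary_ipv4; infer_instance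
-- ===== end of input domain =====

-- B replaces A's split('.')+per-part subset check by a single positional scan (same O(n) cost, different algorithm).


-- ===== PORT A =====
-- address.split(".") never raises for a String argument, so the try/except is inert;
-- the early-return for-loop is the List.all of its body.
def is_valid_binary_ipv4 (address : String) : Bool :=
  let parts := (PySem.Str.split? address ".").getD []   -- sep "." ≠ "", so split? is some
  if parts.length ≠ 4 then false
  else parts.all (fun part =>
    let binary_digit := part
    PySem.Set.issubset (PySem.Set.ofList binary_digit.toList) (PySem.Set.ofList ['0', '1'])
      && (PySem.Str.len part == 8))

-- ===== PORT B =====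
-- length check, then the enumerate loop; Python's "ch not in '01'" on a single
-- character is exactly ch ≠ '0' ∧ ch ≠ '1', ported as the beq disjunction (exact on chars).
def is_valid_binary_ipv4_alt (address : String) : Bool :=
  if PySem.Str.len address ≠ 35 then false
  else (PySem.List.enumerate address.toList).all (fun p =>
    if p.1 == 8 || p.1 == 17 || p.1 == 26 then p.2 == '.'
    else p.2 == '0' || p.2 == '1')

-- ===== PRECONDITION & SPEC =====
def Spec_is_valid_binary_ipv4 (address : String) (out : Bool) : Prop := out = is_valid_binary_ipv4_alt address
instance (address : String) (out : Bool) : Decidable (Spec_is_valid_binary_ipv4 address out) := by unfold Spec_is_valid_binary_ipv4; infer_instance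

-- ===== CLAIM (what is proved, stated in full; the proofs are below) =====
def Claim_equal_is_valid_binary_ipv4 : Prop := ∀ (address : String), Dom_is_valid_binary_ipv4 address → Spec_is_valid_binary_ipv4 address (is_valid_binary_ipv4 address)

-- ===== LEMMAS AND PROOFS =====

/-- A part is 8 binary digits. -/
def pvOk (p : List Char) : Prop := p.length = 8 ∧ ∀ c ∈ p, c = '0' ∨ c = '1'

/-- The common characterisation both ports are proved equivalent to. -/
def pvValid (cs : List Char) : Prop :=
  ∃ p1 p2 p3 p4, cs = p1 ++ '.' :: (p2 ++ '.' :: (p3 ++ '.' :: p4)) ∧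
    pvOk p1 ∧ pvOk p2 ∧ pvOk p3 ∧ pvOk p4

/-- Structural single-'.' splitter (reference form of `PySem.Chars.splitOn · ['.']`). -/
def pvSplit (pre : List Char) : List Char → List (List Char)
  | [] => [pre]
  | c :: r => if c = '.' then pre :: pvSplit [] r else pvSplit (pre ++ [c]) r

theorem pvSplit_go (l : List Char) : ∀ (fuel : Nat) (cur : List Char) (acc : List (List Char)),
    l.length ≤ fuel →
    PySem.Chars.splitOn.go ['.'] fuel l cur acc = acc.reverse ++ pvSplit cur.reverse l := by
  induction l with
  | nil =>
    intro fuel cur acc _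
    cases fuel <;> simp [PySem.Chars.splitOn.go, pvSplit]
  | cons c r ih =>
    intro fuel cur acc hle
    cases fuel with
    | zero => simp at hle
    | succ f =>
      have hle' : r.length ≤ f := by simpa using hle
      rw [PySem.Chars.splitOn.go.eq_def]
      by_cases hc : c = '.'
      · subst hc
        simp [List.isPrefixOf, ih f [] (List.reverse cur :: acc) hle', pvSplit]
      · have hc' : ¬('.' = c) := fun e => hc e.symm
        simp [List.isPrefixOf, hc', hc, ih f (c :: cur) acc hle', pvSplit]

theorem pvSplitOn_eq (cs : List Char) : PySem.Chars.splitOn cs ['.'] = pvSplit [] cs := by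
  simpa [PySem.Chars.splitOn] using pvSplit_go cs (cs.length + 1) [] [] (by omega)

theorem pvSplit_ne_nil (l : List Char) : ∀ pre, pvSplit pre l ≠ [] := by
  induction l with
  | nil => intro pre; simp [pvSplit]
  | cons c r ih =>
    intro pre
    by_cases hc : c = '.' <;> simp [pvSplit, hc, ih]

/-- Rebuild the string from its split. -/
def pvJoin : List (List Char) → List Char
  | [] => []
  | [p] => p
  | p :: ps => p ++ '.' :: pvJoin ps

theorem pvJoin_cons (p : List Char) (ps : List (List Char)) (h : ps ≠ []) :
    pvJoin (p :: ps) = p ++ '.' :: pvJoin ps := by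
  cases ps with
  | nil => exact absurd rfl h
  | cons q qs => rfl

theorem pvSplit_join (l : List Char) : ∀ pre, pvJoin (pvSplit pre l) = pre ++ l := by
  induction l with
  | nil => intro pre; simp [pvSplit, pvJoin]
  | cons c r ih =>
    intro pre
    by_cases hc : c = '.'
    · subst hc
      rw [show pvSplit pre ('.' :: r) = pre :: pvSplit [] r by simp [pvSplit],
        pvJoin_cons _ _ (pvSplit_ne_nil r []), ih []]
      simp
    · have : pvSplit pre (c :: r) = pvSplit (pre ++ [c]) r := by simp [pvSplit, hc]
      rw [this, ih]
      simp

theorem pvSplit_dotfree (p : List Char) (h : '.' ∉ p) : ∀ pre, pvSplit pre p = [pre ++ p] := by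
  induction p with
  | nil => intro pre; simp [pvSplit]
  | cons c r ih =>
    intro pre
    simp only [List.mem_cons, not_or] at h
    have hc : ¬ c = '.' := fun e => h.1 e.symm
    simp [pvSplit, hc, ih h.2]

theorem pvSplit_dotfree_dot (p : List Char) (h : '.' ∉ p) (rest : List Char) :
    ∀ pre, pvSplit pre (p ++ '.' :: rest) = (pre ++ p) :: pvSplit [] rest := by
  induction p with
  | nil => intro pre; simp [pvSplit]
  | cons c r ih =>
    intro pre
    simp only [List.mem_cons, not_or] at h
    have hc : ¬ c = '.' := fun e => h.1 e.symm
    simp [pvSplit, hc, ih h.2]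

theorem pvOk_not_dot {p : List Char} (h : pvOk p) : '.' ∉ p := by
  intro hm
  rcases h.2 _ hm with h' | h' <;> simp at h'

theorem pvA_iff (address : String) :
    is_valid_binary_ipv4 address = true ↔ pvValid address.toList := by
  have hsplit : PySem.Str.split? address "." =
      some ((pvSplit [] address.toList).map String.ofList) := by
    simp [PySem.Str.split?, PySem.Chars.split?, pvSplitOn_eq]
  unfold is_valid_binary_ipv4
  rw [hsplit]
  simp only [Option.getD_some, List.length_map, List.all_map]
  have hg : ∀ p : List Char,
      ((PySem.Set.issubset (PySem.Set.ofList (String.ofList p).toList)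
          (PySem.Set.ofList ['0', '1']) && (PySem.Str.len (String.ofList p) == 8)) = true)
        ↔ pvOk p := by
    intro p
    simp only [Bool.and_eq_true, beq_iff_eq, PySem.Str.len_eq]
    rw [PySem.Set.issubset_iff]
    unfold pvOk
    constructor
    · rintro ⟨hs, hl⟩
      refine ⟨by simp at hl; exact_mod_cast hl, fun c hc => ?_⟩
      have := hs c (by simp [PySem.Set.mem_ofList, hc])
      simpa [PySem.Set.mem_ofList] using this
    · rintro ⟨hl, hs⟩
      refine ⟨fun c hc => ?_, by simp [hl]⟩
      have hcp : c ∈ p := by simpa [PySem.Set.mem_ofList] using hc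
      rcases hs c hcp with h' | h' <;> simp [PySem.Set.mem_ofList, h']
  constructor
  · intro h
    by_cases h4 : (pvSplit [] address.toList).length = 4
    swap
    · rw [if_pos (by simpa using h4)] at h
      exact absurd h (by simp)
    · rw [if_neg (by simp [h4])] at h
      obtain ⟨p1, p2, p3, p4, hps⟩ : ∃ a b c d, pvSplit [] address.toList = [a, b, c, d] := by
        rcases hl : pvSplit [] address.toList with _ | ⟨a, _ | ⟨b, _ | ⟨c, _ | ⟨d, _ | _⟩⟩⟩⟩ <;>
          simp_all
      have hcs := pvSplit_join address.toList []
      rw [hps] at hcs h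
      simp only [List.all_cons, List.all_nil, Bool.and_true, Bool.and_eq_true] at h
      refine ⟨p1, p2, p3, p4, ?_, (hg p1).1 h.1, (hg p2).1 h.2.1, (hg p3).1 h.2.2.1,
        (hg p4).1 h.2.2.2⟩
      have hcs' : address.toList = pvJoin [p1, p2, p3, p4] := by simpa using hcs.symm
      rw [hcs']
      simp [pvJoin]
  · rintro ⟨p1, p2, p3, p4, hcs, h1, h2, h3, h4⟩
    have hsp : pvSplit [] address.toList = [p1, p2, p3, p4] := by
      rw [hcs, pvSplit_dotfree_dot p1 (pvOk_not_dot h1),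
        pvSplit_dotfree_dot p2 (pvOk_not_dot h2), pvSplit_dotfree_dot p3 (pvOk_not_dot h3),
        pvSplit_dotfree p4 (pvOk_not_dot h4)]
      simp
    rw [hsp, if_neg (by simp)]
    simp
    exact ⟨⟨h1.2, by exact_mod_cast h1.1⟩, ⟨h2.2, by exact_mod_cast h2.1⟩,
      ⟨h3.2, by exact_mod_cast h3.1⟩, h4.2, by exact_mod_cast h4.1⟩

/-- What one checked position tells us. -/
theorem pvCond_char (k : Nat) (c : Char)
    (h : (if ((k : Int) == 8 || (k : Int) == 17 || (k : Int) == 26) then c == '.'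
          else (c == '0' || c == '1')) = true) :
    ((k = 8 ∨ k = 17 ∨ k = 26) → c = '.') ∧
    (k ≠ 8 → k ≠ 17 → k ≠ 26 → (c = '0' ∨ c = '1')) := by
  have h8 : ((k : Int) = 8) ↔ k = 8 := by omega
  have h17 : ((k : Int) = 17) ↔ k = 17 := by omega
  have h26 : ((k : Int) = 26) ↔ k = 26 := by omega
  by_cases hd : k = 8 ∨ k = 17 ∨ k = 26
  · rw [if_pos (by simp [beq_iff_eq, h8, h17, h26]; tauto)] at h
    simp only [beq_iff_eq] at h
    exact ⟨fun _ => h, fun a b c' => by tauto⟩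
  · rw [if_neg (by simp [beq_iff_eq, h8, h17, h26]; tauto)] at h
    simp only [Bool.or_eq_true, beq_iff_eq] at h
    exact ⟨fun hx => absurd hx hd, fun _ _ _ => h⟩

/-- One binary part starting at `s` passes the scan. -/
theorem pvCond_part (s : Int) (p : List Char) (hp : ∀ c ∈ p, c = '0' ∨ c = '1')
    (hs : ∀ k : Nat, k < p.length → s + k ≠ 8 ∧ s + k ≠ 17 ∧ s + k ≠ 26) :
    (PySem.List.enumerate p s).all (fun q =>
      if q.1 == 8 || q.1 == 17 || q.1 == 26 then q.2 == '.'
      else q.2 == '0' || q.2 == '1') = true := by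
  rw [List.all_eq_true]
  intro x hx
  obtain ⟨k, hk, rfl⟩ := (PySem.List.mem_enumerate_iff p s x).1 hx
  obtain ⟨e8, e17, e26⟩ := hs k hk
  rw [if_neg (by simp [beq_iff_eq]; tauto)]
  rcases hp _ (List.getElem_mem hk) with h | h <;> simp [h]

theorem pvB_iff (address : String) :
    is_valid_binary_ipv4_alt address = true ↔ pvValid address.toList := by
  unfold is_valid_binary_ipv4_alt
  constructor
  · intro h
    by_cases hlen : PySem.Str.len address ≠ 35
    · rw [if_pos hlen] at h
      exact absurd h (by simp)
    · rw [if_neg hlen] at h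
      have h35 : address.toList.length = 35 := by
        simp only [ne_eq, not_not, PySem.Str.len_eq] at hlen
        exact_mod_cast hlen
      set cs := address.toList with hcsdef
      rw [List.all_eq_true] at h
      have hk : ∀ (k : Nat) (hklt : k < cs.length),
          ((k = 8 ∨ k = 17 ∨ k = 26) → cs[k] = '.') ∧
          (k ≠ 8 → k ≠ 17 → k ≠ 26 → (cs[k] = '0' ∨ cs[k] = '1')) := by
        intro k hklt
        have hm : ((k : Int), cs[k]) ∈ PySem.List.enumerate cs 0 := by
          rw [PySem.List.mem_enumerate_iff]
          exact ⟨k, hklt, by simp⟩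
        exact pvCond_char k cs[k] (h _ hm)
      refine ⟨cs.take 8, (cs.drop 9).take 8, (cs.drop 18).take 8, cs.drop 27, ?_, ?_, ?_, ?_, ?_⟩
      · have e1 : cs.drop 8 = '.' :: cs.drop 9 := by
          rw [List.drop_eq_getElem_cons (by omega)]
          exact congrArg (· :: _) ((hk 8 (by omega)).1 (by tauto))
        have e2 : cs.drop 9 = (cs.drop 9).take 8 ++ cs.drop 17 := by
          conv_lhs => rw [← List.take_append_drop 8 (cs.drop 9)]
          rw [List.drop_drop]
        have e3 : cs.drop 17 = '.' :: cs.drop 18 := by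
          rw [List.drop_eq_getElem_cons (by omega)]
          exact congrArg (· :: _) ((hk 17 (by omega)).1 (by tauto))
        have e4 : cs.drop 18 = (cs.drop 18).take 8 ++ cs.drop 26 := by
          conv_lhs => rw [← List.take_append_drop 8 (cs.drop 18)]
          rw [List.drop_drop]
        have e5 : cs.drop 26 = '.' :: cs.drop 27 := by
          rw [List.drop_eq_getElem_cons (by omega)]
          exact congrArg (· :: _) ((hk 26 (by omega)).1 (by tauto))
        conv_lhs => rw [← List.take_append_drop 8 cs, e1, e2, e3, e4, e5]
      · refine ⟨by simp [h35], ?_⟩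
        intro c hc
        obtain ⟨i, hi, rfl⟩ := List.mem_iff_getElem.1 hc
        have hi8 : i < 8 := by simp [h35] at hi; omega
        rw [List.getElem_take]
        exact (hk i (by omega)).2 (by omega) (by omega) (by omega)
      · refine ⟨by simp [h35], ?_⟩
        intro c hc
        obtain ⟨i, hi, rfl⟩ := List.mem_iff_getElem.1 hc
        have hi8 : i < 8 := by simp [h35] at hi; omega
        rw [List.getElem_take, List.getElem_drop]
        exact (hk (9 + i) (by omega)).2 (by omega) (by omega) (by omega)
      · refine ⟨by simp [h35], ?_⟩
        intro c hc
        obtain ⟨i, hi, rfl⟩ := List.mem_iff_getElem.1 hc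
        have hi8 : i < 8 := by simp [h35] at hi; omega
        rw [List.getElem_take, List.getElem_drop]
        exact (hk (18 + i) (by omega)).2 (by omega) (by omega) (by omega)
      · refine ⟨by simp [h35], ?_⟩
        intro c hc
        obtain ⟨i, hi, rfl⟩ := List.mem_iff_getElem.1 hc
        rw [List.getElem_drop]
        have hi8 : i < 8 := by simp [h35] at hi; omega
        exact (hk (27 + i) (by omega)).2 (by omega) (by omega) (by omega)
  · rintro ⟨p1, p2, p3, p4, hcs, ⟨hl1, hb1⟩, ⟨hl2, hb2⟩, ⟨hl3, hb3⟩, ⟨hl4, hb4⟩⟩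
    have h35 : address.toList.length = 35 := by simp [hcs, hl1, hl2, hl3, hl4]
    rw [if_neg (by simp [PySem.Str.len_eq, h35])]
    rw [hcs]
    rw [PySem.List.enumerate_append]
    rw [show PySem.List.enumerate ('.' :: (p2 ++ '.' :: (p3 ++ '.' :: p4))) (0 + p1.length)
        = (0 + (p1.length : Int), '.') :: PySem.List.enumerate (p2 ++ '.' :: (p3 ++ '.' :: p4))
            (0 + p1.length + 1) from PySem.List.enumerate_cons ..]
    rw [PySem.List.enumerate_append]
    rw [show ∀ s : Int, PySem.List.enumerate ('.' :: (p3 ++ '.' :: p4)) s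
        = (s, '.') :: PySem.List.enumerate (p3 ++ '.' :: p4) (s + 1)
        from fun s => PySem.List.enumerate_cons ..]
    rw [PySem.List.enumerate_append]
    rw [show ∀ s : Int, PySem.List.enumerate ('.' :: p4) s
        = (s, '.') :: PySem.List.enumerate p4 (s + 1)
        from fun s => PySem.List.enumerate_cons ..]
    simp only [List.all_append, List.all_cons, Bool.and_eq_true]
    refine ⟨?_, ?_, ?_, ?_, ?_, ?_, ?_⟩
    · exact pvCond_part 0 p1 hb1 (by intro k hk; rw [hl1] at hk; omega)
    · rw [if_pos (by simp [hl1])]; simp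
    · exact pvCond_part _ p2 hb2 (by intro k hk; rw [hl2] at hk; simp only [hl1]; omega)
    · rw [if_pos (by simp [hl1, hl2])]; simp
    · exact pvCond_part _ p3 hb3 (by intro k hk; rw [hl3] at hk; simp only [hl1, hl2]; omega)
    · rw [if_pos (by simp [hl1, hl2, hl3])]; simp
    · exact pvCond_part _ p4 hb4 (by intro k hk; rw [hl4] at hk; simp only [hl1, hl2, hl3]; omega)

-- ===== VERDICT (by name: the statement is the Claim_ definition above) =====
theorem is_valid_binary_ipv4_spec : Claim_equal_is_valid_binary_ipv4 := by
  intro address _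
  unfold Spec_is_valid_binary_ipv4
  have ha := pvA_iff address
  have hb := pvB_iff address
  cases h : is_valid_binary_ipv4_alt address
  · cases h2 : is_valid_binary_ipv4 address
    · rfl
    · exact absurd (hb.2 (ha.1 h2)) (by simp [h])
  · exact ha.2 (hb.1 h)
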